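-- pv_equiv track=rewrite | github.com/butayama/bivarcontours | src/bivarcontours/unit_handling/sympy_pint_resulting_units.py | calculate_unit
-- ===== SOURCE A (Python) =====
-- class UnitError(Exception):
--     def __init__(self, message):
--         self.message = message
--         super().__init__(self.message)
--
-- def calculate_unit(formula, x_dim, y_dim):
--     # Replace x and y in the formula with their dimensions
--     formula = formula.replace("x", x_dim).replace("y", y_dim)
--
--     # take care of parentheses
--     formula = formula.replace("(", "").replace(")", "")
--
--     # Split the formula by operation
--     operations = set(["+", "-", "*", "/", "**"])
--     operators = []
--     operands = []
--     current_operand = ""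
--
--     # Parse the formula
--     for char in formula:
--         if char in operations:
--             operators.append(char)
--             operands.append(current_operand.strip())
--             current_operand = ""
--         else:
--             current_operand += char
--
--     operands.append(current_operand.strip())  # Add the last operand
--
--     # Calculate the resulting dimension
--     for i, operator in enumerate(operators):
--         if operator in ["+", "-"]:
--             if operands[i] != operands[i + 1]:
--                 raise UnitError("Dimensions must be the same for addition/subtraction")
--             else:
--                 operands[i + 1] = operands[i]
--         elif operator == "*":
--             operands[i + 1] = operands[i] + "*" + operands[i + 1]
--         elif operator == "/":
--             operands[i + 1] = operands[i] + "/" + operands[i + 1]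
--         elif operator == "**":
--             if operands[i + 1] != "":
--                 raise UnitError("Exponent must be dimensionless for power operation")
--             operands[i + 1] = operands[i] + "^" + operands[i + 1]
--
--     return operands[-1]
-- ===== SOURCE B (Python) =====
-- class UnitError(Exception):
--     def __init__(self, message):
--         self.message = message
--         super().__init__(self.message)
--
-- def calculate_unit(formula, x_dim, y_dim):
--     # Same substitution and parenthesis stripping, then ONE streaming pass:
--     # a scalar accumulator + pending operator instead of tokenizing into
--     # operator/operand lists followed by an index-based fold.
--     formula = formula.replace("x", x_dim).replace("y", y_dim)
--     formula = formula.replace("(", "").replace(")", "")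
--
--     def apply(acc, pending, operand):
--         if pending is None:
--             return operand
--         if pending in ("+", "-"):
--             if acc != operand:
--                 raise UnitError("Dimensions must be the same for addition/subtraction")
--             return acc
--         if pending == "*":
--             return acc + "*" + operand
--         return acc + "/" + operand
--
--     acc = None
--     pending = None
--     buf = ""
--     for ch in formula:
--         if ch in "+-*/":
--             acc = apply(acc, pending, buf.strip())
--             pending = ch
--             buf = ""
--         else:
--             buf += ch
--     return apply(acc, pending, buf.strip())
-- ===== Notes on version B (the rewrite author's own statement) =====
-- stated objective: simpler
-- what changed: A tokenizes into parallel operator/operand lists and then folds with index-based in-place list updates; B does a single streaming pass keeping only a scalar accumulator, a pending operator and an operand buffer, so the lists and the enumerate/index fold disappear.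
import Mathlib
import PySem

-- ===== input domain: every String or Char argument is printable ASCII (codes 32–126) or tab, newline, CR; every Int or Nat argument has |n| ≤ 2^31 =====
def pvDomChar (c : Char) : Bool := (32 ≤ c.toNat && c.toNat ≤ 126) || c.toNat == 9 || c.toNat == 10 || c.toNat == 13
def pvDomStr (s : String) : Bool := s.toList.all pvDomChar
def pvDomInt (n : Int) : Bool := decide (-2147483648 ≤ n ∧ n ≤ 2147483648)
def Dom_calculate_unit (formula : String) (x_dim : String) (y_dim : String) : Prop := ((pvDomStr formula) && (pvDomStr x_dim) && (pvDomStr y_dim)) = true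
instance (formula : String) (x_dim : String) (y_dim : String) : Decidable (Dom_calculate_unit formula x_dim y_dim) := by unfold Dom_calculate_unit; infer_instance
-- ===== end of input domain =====

-- B replaces A's two-phase tokenize-into-lists + index-fold by one streaming pass
-- with a scalar accumulator and a pending operator (objective: simpler).

-- ===== PORT A =====

-- shared by both ports (both Pythons start with the same four .replace lines):
-- formula.replace("x", x_dim).replace("y", y_dim).replace("(", "").replace(")", "")
def pvSubst (formula : String) (x_dim : String) (y_dim : String) : List Char :=
  (PySem.Str.replace (PySem.Str.replace (PySem.Str.replace (PySem.Str.replace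
    formula "x" x_dim) "y" y_dim) "(" "") ")" "").toList

-- char in {"+", "-", "*", "/", "**"}: a single char never equals "**", so four tests
def pvOpChar (c : Char) : Bool := c = '+' || c = '-' || c = '*' || c = '/'

-- body of A's parsing for-loop; state = (operators, operands, current_operand)
def pvTokStep (st : List Char × List (List Char) × List Char) (c : Char) :
    List Char × List (List Char) × List Char :=
  if pvOpChar c then (st.1 ++ [c], st.2.1 ++ [PySem.Chars.strip st.2.2], ([] : List Char))
  else (st.1, st.2.1, st.2.2 ++ [c])

-- body of A's second loop at (i, operator); none = raise UnitError
def pvStepA (l : List (List Char)) (i : Int) (op : Char) : Option (List (List Char)) :=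
  if op = '+' ∨ op = '-' then
    if PySem.List.pyGetD l i [] ≠ PySem.List.pyGetD l (i + 1) [] then none
    else some (PySem.List.pySetD l (i + 1) (PySem.List.pyGetD l i []))
  else if op = '*' then
    some (PySem.List.pySetD l (i + 1)
      (PySem.List.pyGetD l i [] ++ '*' :: PySem.List.pyGetD l (i + 1) []))
  else if op = '/' then
    some (PySem.List.pySetD l (i + 1)
      (PySem.List.pyGetD l i [] ++ '/' :: PySem.List.pyGetD l (i + 1) []))
  else some l  -- A's "**" branch: unreachable, operators hold single characters

def calculate_unit (formula : String) (x_dim : String) (y_dim : String) : String :=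
  let cs := pvSubst formula x_dim y_dim
  let p := cs.foldl pvTokStep ([], [], [])
  let operands := p.2.1 ++ [PySem.Chars.strip p.2.2]
  match (PySem.List.enumerate p.1 0).foldl
      (fun acc q => acc.bind (fun l => pvStepA l q.1 q.2)) (some operands) with
  | some l => String.ofList (PySem.List.pyGetD l (-1) [])  -- return operands[-1]
  | none => ""  -- Python raises UnitError here; excluded by Pre_

-- ===== PORT B =====

-- B's apply(acc, pending, operand); state none = "pending is None"
def pvCombine (st : Option (List Char × Char)) (w : List Char) : Option (List Char) :=
  match st with
  | none => some w
  | some (a, p) =>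
    if p = '+' ∨ p = '-' then (if a ≠ w then none else some a)
    else if p = '*' then some (a ++ '*' :: w)
    else some (a ++ '/' :: w)

-- B's streaming for-loop: (acc, pending) as Option pair, plus the operand buffer
def pvRunB : List Char → Option (List Char × Char) → List Char → Option (List Char)
  | [], st, buf => pvCombine st (PySem.Chars.strip buf)
  | c :: cs, st, buf =>
    if pvOpChar c then
      match pvCombine st (PySem.Chars.strip buf) with
      | none => none
      | some a => pvRunB cs (some (a, c)) []
    else pvRunB cs st (buf ++ [c])

def calculate_unit_alt (formula : String) (x_dim : String) (y_dim : String) : String :=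
  match pvRunB (pvSubst formula x_dim y_dim) none [] with
  | some a => String.ofList a
  | none => ""  -- Python raises UnitError here; excluded by Pre_

-- ===== PRECONDITION & SPEC =====

def pvAddSub (c : Char) : Bool := c = '+' || c = '-'

-- Pre_ excludes exactly the inputs on which Python A raises UnitError (and B raises it
-- too): writing the substituted, parenthesis-stripped formula as stripped operand
-- segments separated by operator characters, A raises iff some '+'/'-' operator is
-- preceded by a '*' or '/' (the accumulated dimension then contains a '*'/'/' and can
-- never equal the next plain operand) or the operands up to and including the one after
-- that '+'/'-' are not all equal. Pre_ states the negation of that closed-form condition.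
def Pre_calculate_unit (formula : String) (x_dim : String) (y_dim : String) : Prop :=
  let cs := pvSubst formula x_dim y_dim
  let ops := cs.filter pvOpChar
  let toks := (cs.splitOnP pvOpChar).map PySem.Chars.strip
  ∀ k, k < ops.length → pvAddSub (ops.getD k ' ') →
    (∀ j, j ≤ k → pvAddSub (ops.getD j ' ')) ∧
    (∀ i, i ≤ k + 1 → toks.getD i [] = toks.getD 0 [])
instance (formula : String) (x_dim : String) (y_dim : String) :
    Decidable (Pre_calculate_unit formula x_dim y_dim) := by
  unfold Pre_calculate_unit; infer_instance

def pvWitness_calculate_unit : String × String × String := ("x+x*y", "m", "s")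

def Spec_calculate_unit (formula : String) (x_dim : String) (y_dim : String) (out : String) : Prop := out = calculate_unit_alt formula x_dim y_dim
instance (formula : String) (x_dim : String) (y_dim : String) (out : String) : Decidable (Spec_calculate_unit formula x_dim y_dim out) := by unfold Spec_calculate_unit; infer_instance

-- ===== CLAIM (what is proved, stated in full; the proofs are below) =====
def Claim_equal_calculate_unit : Prop := ∀ (formula : String) (x_dim : String) (y_dim : String), Dom_calculate_unit formula x_dim y_dim → Pre_calculate_unit formula x_dim y_dim → Spec_calculate_unit formula x_dim y_dim (calculate_unit formula x_dim y_dim)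

-- ===== LEMMAS AND PROOFS =====


-- spec-level tokenizer: what A's parsing foldl appends (proof-only)
def pvTok : List Char → List Char → List Char × List (List Char) × List Char
  | [], buf => ([], [], buf)
  | c :: cs, buf =>
    if pvOpChar c then
      (c :: (pvTok cs []).1, PySem.Chars.strip buf :: (pvTok cs []).2.1, (pvTok cs []).2.2)
    else pvTok cs (buf ++ [c])

-- A's second loop, reformulated on the (operator, next operand) stream:
-- the whole operands list it builds …
def pvRunList : List Char → List (Char × List Char) → Option (List (List Char))
  | a, [] => some [a]
  | a, (op, w) :: r =>
    match pvCombine (some (a, op)) w with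
    | none => none
    | some a' => (pvRunList a' r).map (a :: ·)

-- … and just its final accumulator
def pvChainF : List Char → List (Char × List Char) → Option (List Char)
  | a, [] => some a
  | a, (op, w) :: r =>
    match pvCombine (some (a, op)) w with
    | none => none
    | some a' => pvChainF a' r

-- B's streaming loop on the token stream, with a trailing operand
def pvChainAux : Option (List Char × Char) → List (Char × List Char) → List Char → Option (List Char)
  | st, [], last => pvCombine st last
  | st, (o, w) :: r, last =>
    match pvCombine st w with
    | none => none
    | some a => pvChainAux (some (a, o)) r last

lemma pv_foldl_tok (cs : List Char) : ∀ (os : List Char) (ws : List (List Char)) (buf : List Char),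
    cs.foldl pvTokStep (os, ws, buf)
      = (os ++ (pvTok cs buf).1, ws ++ (pvTok cs buf).2.1, (pvTok cs buf).2.2) := by
  induction cs with
  | nil => intro os ws buf; simp [pvTok]
  | cons c cs ih =>
    intro os ws buf
    by_cases h : pvOpChar c
    · simp [pvTokStep, h, pvTok, ih]
    · simp [pvTokStep, h, pvTok, ih]

lemma pv_tok_len (cs : List Char) : ∀ buf, (pvTok cs buf).1.length = (pvTok cs buf).2.1.length := by
  induction cs with
  | nil => intro buf; simp [pvTok]
  | cons c cs ih =>
    intro buf
    by_cases h : pvOpChar c <;> simp [pvTok, h, ih]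

lemma pv_tok_ops (cs : List Char) : ∀ buf o, o ∈ (pvTok cs buf).1 → pvOpChar o := by
  induction cs with
  | nil => intro buf o ho; simp [pvTok] at ho
  | cons c cs ih =>
    intro buf o ho
    by_cases h : pvOpChar c
    · simp [pvTok, h] at ho
      rcases ho with rfl | ho
      · exact h
      · exact ih [] o ho
    · simp [pvTok, h] at ho
      exact ih (buf ++ [c]) o ho

lemma pv_foldl_none (l : List (Int × Char)) :
    l.foldl (fun acc q => acc.bind (fun m => pvStepA m q.1 q.2)) none = none := by
  induction l with
  | nil => rfl
  | cons q l ih => simpa using ih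

lemma pv_getD_mid {α : Type} (pre : List α) (x : α) (l : List α) (k : Nat) (d : α) :
    (pre ++ x :: l).getD (pre.length + k) d = (x :: l).getD k d := by
  simp [List.getD_eq_getElem?_getD, List.getElem?_append_right (Nat.le_add_right _ _)]

lemma pv_set_mid {α : Type} (pre : List α) (l : List α) (k : Nat) (v : α) :
    (pre ++ l).set (pre.length + k) v = pre ++ l.set k v := by
  induction pre with
  | nil => simp
  | cons p pre ih => simp [ih, Nat.succ_add]

lemma pv_stepA_eq (pre : List (List Char)) (a w : List Char) (ws' : List (List Char)) (o : Char)
    (ho : pvOpChar o) :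
    pvStepA (pre ++ a :: w :: ws') ((pre.length : Int)) o
      = (pvCombine (some (a, o)) w).map (fun v => (pre ++ [a]) ++ v :: ws') := by
  have hga : PySem.List.pyGetD (pre ++ a :: w :: ws') ((pre.length : Int)) ([] : List Char) = a := by
    rw [PySem.List.pyGetD_natCast]
    simpa using pv_getD_mid pre a (w :: ws') 0 []
  have hcast : ((pre.length : Int) + 1) = (((pre.length + 1 : Nat)) : Int) := by push_cast; ring
  have hgb : PySem.List.pyGetD (pre ++ a :: w :: ws') ((pre.length : Int) + 1) ([] : List Char) = w := by
    rw [hcast, PySem.List.pyGetD_natCast]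
    simpa using pv_getD_mid pre a (w :: ws') 1 []
  have hset : ∀ v, PySem.List.pySetD (pre ++ a :: w :: ws') ((pre.length : Int) + 1) v
      = (pre ++ [a]) ++ v :: ws' := by
    intro v
    rw [hcast, PySem.List.pySetD_natCast]
    simpa using pv_set_mid pre (a :: w :: ws') 1 v
  simp only [pvOpChar, Bool.or_eq_true, decide_eq_true_eq] at ho
  unfold pvStepA pvCombine
  rcases ho with ((h | h) | h) | h <;> subst h
  · simp only [hga, hgb]
    by_cases hw : a = w
    · subst hw; simp [hset]
    · simp [hw]
  · simp only [hga, hgb]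
    by_cases hw : a = w
    · subst hw; simp [hset]
    · simp [hw]
  · simp [hga, hgb, hset]
  · simp [hga, hgb, hset]

lemma pv_loopA_eq (ops : List Char) : ∀ (ws : List (List Char)) (pre : List (List Char)) (a : List Char),
    ws.length = ops.length → (∀ o ∈ ops, pvOpChar o = true) →
    (PySem.List.enumerate ops ((pre.length : Nat) : Int)).foldl
        (fun acc q => acc.bind (fun m => pvStepA m q.1 q.2)) (some (pre ++ a :: ws))
      = (pvRunList a (ops.zip ws)).map (fun vs => pre ++ vs) := by
  induction ops with
  | nil =>
    intro ws pre a hl _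
    have : ws = [] := List.length_eq_zero_iff.mp hl
    subst this
    simp [PySem.List.enumerate_nil, pvRunList]
  | cons o ops ih =>
    intro ws pre a hl hop
    cases ws with
    | nil => simp at hl
    | cons w ws' =>
      rw [PySem.List.enumerate_cons]
      simp only [List.foldl_cons, Option.bind_some]
      rw [pv_stepA_eq pre a w ws' o (hop o (by simp))]
      cases hc : pvCombine (some (a, o)) w with
      | none => simp [pvRunList, hc, pv_foldl_none]
      | some a' =>
        have hlen' : ((pre.length : Int) + 1) = (((pre ++ [a]).length : Nat) : Int) := by
          simp
        rw [Option.map_some, hlen',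
          ih ws' (pre ++ [a]) a' (by simpa using hl) (fun o' ho' => hop o' (by simp [ho']))]
        simp [pvRunList, hc, Option.map_map, Function.comp_def]

lemma pv_runList_ne_nil (l : List (Char × List Char)) : ∀ a vs, pvRunList a l = some vs → vs ≠ [] := by
  induction l with
  | nil =>
    intro a vs h
    simp only [pvRunList, Option.some.injEq] at h
    simp [← h]
  | cons p l ih =>
    obtain ⟨op, w⟩ := p
    intro a vs h
    unfold pvRunList at h
    cases hc : pvCombine (some (a, op)) w <;> rw [hc] at h
    · simp at h
    · simp only [Option.map_eq_some_iff] at h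
      obtain ⟨vs', _, rfl⟩ := h
      simp

lemma pv_runList_last (l : List (Char × List Char)) : ∀ a,
    (pvRunList a l).map (fun vs => PySem.List.pyGetD vs (-1) ([] : List Char)) = pvChainF a l := by
  induction l with
  | nil =>
    intro a
    simpa [pvRunList, pvChainF] using
      PySem.List.pyGetD_neg_one_append_singleton ([] : List (List Char)) a []
  | cons p l ih =>
    obtain ⟨op, w⟩ := p
    intro a
    unfold pvRunList pvChainF
    cases hc : pvCombine (some (a, op)) w
    · simp
    · rename_i a'
      simp only
      cases hr : pvRunList a' l with
      | none =>
        have h2 := ih a'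
        rw [hr] at h2
        simp [← h2]
      | some vs =>
        have hne := pv_runList_ne_nil l a' vs hr
        have h2 := ih a'
        rw [hr] at h2
        simp only [Option.map_some] at h2
        rw [← h2]
        simp only [Option.map_some, Option.some.injEq]
        rw [PySem.List.pyGetD_neg_one (a :: vs) [] (by simp), PySem.List.pyGetD_neg_one vs [] hne]
        exact List.getLast_cons hne

lemma pv_runB_eq (cs : List Char) : ∀ st buf,
    pvRunB cs st buf
      = pvChainAux st ((pvTok cs buf).1.zip (pvTok cs buf).2.1)
          (PySem.Chars.strip (pvTok cs buf).2.2) := by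
  induction cs with
  | nil => intro st buf; simp [pvRunB, pvTok, pvChainAux]
  | cons c cs ih =>
    intro st buf
    by_cases h : pvOpChar c
    · simp only [pvRunB, h, if_pos, pvTok]
      cases hc : pvCombine st (PySem.Chars.strip buf) with
      | none => simp [pvChainAux, hc]
      | some a => simp [pvChainAux, hc, ih]
    · simp [pvRunB, h, pvTok, ih]

lemma pv_chain_bridge (ops : List Char) : ∀ (ws : List (List Char)) (a : List Char) (o : Char)
    (last : List Char), ops.length = ws.length →
    pvChainAux (some (a, o)) (ops.zip ws) last = pvChainF a ((o :: ops).zip (ws ++ [last])) := by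
  induction ops with
  | nil =>
    intro ws a o last hl
    have : ws = [] := List.length_eq_zero_iff.mp hl.symm
    subst this
    simp only [List.zip_nil_right, List.nil_append, pvChainAux, pvChainF]
    cases hc : pvCombine (some (a, o)) last <;> simp [hc, pvChainF]
  | cons o2 ops ih =>
    intro ws a o last hl
    cases ws with
    | nil => simp at hl
    | cons w ws' =>
      simp only [List.zip_cons_cons, List.cons_append, pvChainAux, pvChainF]
      cases hc : pvCombine (some (a, o)) w with
      | none => simp
      | some a' => simp [ih ws' a' o2 last (by simpa using hl)]

lemma pv_opt_eq (cs : List Char) :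
    ((PySem.List.enumerate (pvTok cs []).1 0).foldl
        (fun acc q => acc.bind (fun m => pvStepA m q.1 q.2))
        (some ((pvTok cs []).2.1 ++ [PySem.Chars.strip (pvTok cs []).2.2]))).map
        (fun m => PySem.List.pyGetD m (-1) ([] : List Char))
      = pvRunB cs none [] := by
  rw [pv_runB_eq]
  have hlen := pv_tok_len cs []
  have hops := pv_tok_ops cs []
  cases hws : (pvTok cs []).2.1 with
  | nil =>
    have h1 : (pvTok cs []).1 = [] := by
      rw [hws] at hlen; exact List.length_eq_zero_iff.mp (by simpa using hlen)
    rw [h1]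
    simp only [PySem.List.enumerate_nil, List.foldl_nil, List.nil_append, List.zip_nil_left,
      pvChainAux, pvCombine, Option.map_some]
    simpa using PySem.List.pyGetD_neg_one_append_singleton ([] : List (List Char))
      (PySem.Chars.strip (pvTok cs []).2.2) []
  | cons w ws' =>
    cases h1 : (pvTok cs []).1 with
    | nil => rw [hws, h1] at hlen; simp at hlen
    | cons o ops' =>
      have hlen2 := hlen
      rw [h1, hws] at hlen2
      have hops2 := hops
      rw [h1] at hops2
      have hl2 : (ws' ++ [PySem.Chars.strip (pvTok cs []).2.2]).length = (o :: ops').length := by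
        simpa using hlen2.symm
      have hA := pv_loopA_eq (o :: ops') (ws' ++ [PySem.Chars.strip (pvTok cs []).2.2])
        [] w hl2 hops2
      simp only [List.nil_append, List.length_nil, Nat.cast_zero] at hA
      simp only [List.cons_append]
      rw [hA]
      have hid : Option.map (fun vs : List (List Char) => vs)
          (pvRunList w ((o :: ops').zip (ws' ++ [PySem.Chars.strip (pvTok cs []).2.2])))
          = pvRunList w ((o :: ops').zip (ws' ++ [PySem.Chars.strip (pvTok cs []).2.2])) := by
        cases pvRunList w ((o :: ops').zip (ws' ++ [PySem.Chars.strip (pvTok cs []).2.2])) <;> rfl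
      rw [hid, pv_runList_last]
      simp only [List.zip_cons_cons, pvChainAux, pvCombine]
      exact (pv_chain_bridge ops' ws' w o (PySem.Chars.strip (pvTok cs []).2.2)
        (by simpa using hlen2)).symm

theorem calculate_unit_spec : Claim_equal_calculate_unit := by
  intro f x y _ _
  unfold Spec_calculate_unit calculate_unit calculate_unit_alt
  simp only [pv_foldl_tok (pvSubst f x y) [] [] [], List.nil_append]
  have h := pv_opt_eq (pvSubst f x y)
  cases hF : (PySem.List.enumerate (pvTok (pvSubst f x y) []).1 0).foldl
      (fun acc q => acc.bind (fun m => pvStepA m q.1 q.2))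
      (some ((pvTok (pvSubst f x y) []).2.1 ++ [PySem.Chars.strip (pvTok (pvSubst f x y) []).2.2])) with
  | none =>
    rw [hF] at h
    simp only [Option.map_none] at h
    rw [← h]
  | some m =>
    rw [hF] at h
    simp only [Option.map_some] at h
    rw [← h]
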